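-- pv_equiv track=rewrite | github.com/devgomesai/DSA | Leetcode-Python/slidingwindow.py | window_arr2
-- ===== SOURCE A (Python) =====
-- def window_arr2(arr: list, k:int):
--     sub_arr = []
--
--     # Base Case
--     if len(arr) < k:
--         return
--
--     slice_wind = arr[:k]
--     sub_arr.append(slice_wind)
--
--     for i in range(k, len(arr)):
--
--         slice_wind = arr[i-k+1 : i+1]
--
--         sub_arr.append(slice_wind)
--
--     return sub_arr
-- ===== SOURCE B (Python) =====
-- def window_arr2(arr: list, k: int):
--     if len(arr) < k:
--         return
--     window = arr[:k]
--     out = [window[:]]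
--     for x in arr[k:]:
--         window.append(x)
--         del window[0]
--         out.append(window[:])
--     return out
-- ===== Notes on version B (the rewrite author's own statement) =====
-- stated objective: alternative
-- what changed: B replaces per-index re-slicing (arr[i-k+1:i+1] for each i) with one pass over the remaining elements maintaining a single sliding window (append newest, delete oldest, snapshot); Pre_ excludes negative k, a meaningless window size on which A's nonempty result is an accident of Python negative-slice arithmetic and B's differs.
-- outside the precondition, e.g. on window_arr2([1, 2, 3], -1): A returns [[1, 2], [], [], [], []], B returns [[1, 2], [2, 3]]
import Mathlib
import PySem

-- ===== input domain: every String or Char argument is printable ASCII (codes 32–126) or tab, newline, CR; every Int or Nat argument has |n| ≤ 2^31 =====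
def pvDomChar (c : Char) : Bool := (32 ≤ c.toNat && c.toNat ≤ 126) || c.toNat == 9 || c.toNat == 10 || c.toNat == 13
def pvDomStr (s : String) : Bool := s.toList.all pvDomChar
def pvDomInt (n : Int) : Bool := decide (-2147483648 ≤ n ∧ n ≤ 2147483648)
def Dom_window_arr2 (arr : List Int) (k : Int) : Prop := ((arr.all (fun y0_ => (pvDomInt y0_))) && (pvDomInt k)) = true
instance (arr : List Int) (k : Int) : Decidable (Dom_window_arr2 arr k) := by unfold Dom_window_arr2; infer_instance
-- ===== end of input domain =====

-- B builds the windows in one pass with a single sliding window (append newest, delete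
-- oldest, snapshot) instead of re-slicing by index; same cost.

-- ===== PORT A =====
def window_arr2 (arr : List Int) (k : Int) : Option (List (List Int)) :=
  if (arr.length : Int) < k then none
  else
    -- sub_arr = [arr[:k]]; for i in range(k, len(arr)): sub_arr.append(arr[i-k+1:i+1])
    some ((PySem.List.pyRange k (arr.length : Int) 1).foldl
      (fun sub_arr i => sub_arr ++ [PySem.List.slice arr (some (i - k + 1)) (some (i + 1))])
      [PySem.List.slice arr none (some k)])

-- ===== PORT B =====
def window_arr2_alt (arr : List Int) (k : Int) : Option (List (List Int)) :=
  if (arr.length : Int) < k then none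
  else
    let window := PySem.List.slice arr none (some k)
    -- for x in arr[k:]: window.append(x); del window[0]; out.append(window[:])
    -- (`del window[0]` ported as `.drop 1`: exact, the window is nonempty after the append)
    some ((PySem.List.slice arr (some k) none).foldl
      (fun (st : List Int × List (List Int)) x =>
        let w := (st.1 ++ [x]).drop 1
        (w, st.2 ++ [w]))
      (window, [window])).2

-- ===== PRECONDITION & SPEC =====
-- Pre_ excludes negative k (a meaningless window size), on which A's nonempty result is an
-- accident of Python negative-slice arithmetic and B's value differs.
def Pre_window_arr2 (arr : List Int) (k : Int) : Prop := 0 ≤ k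
instance (arr : List Int) (k : Int) : Decidable (Pre_window_arr2 arr k) := by unfold Pre_window_arr2; infer_instance

def pvWitness_window_arr2 : List Int × Int := ([1, 2, 3], 2)

def Spec_window_arr2 (arr : List Int) (k : Int) (out : Option (List (List Int))) : Prop := out = window_arr2_alt arr k
instance (arr : List Int) (k : Int) (out : Option (List (List Int))) : Decidable (Spec_window_arr2 arr k out) := by unfold Spec_window_arr2; infer_instance

-- ===== CLAIM (what is proved, stated in full; the proofs are below) =====
def Claim_equal_window_arr2 : Prop := ∀ (arr : List Int) (k : Int), Dom_window_arr2 arr k → Pre_window_arr2 arr k → Spec_window_arr2 arr k (window_arr2 arr k)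

-- ===== LEMMAS AND PROOFS =====

-- the common closed form both sides are reduced to (for 0 ≤ k = kn ≤ arr.length)
def targetWins (arr : List Int) (kn : Nat) : List (List Int) :=
  arr.take kn :: (List.range (arr.length - kn)).map (fun j => (arr.drop (j + 1)).take kn)

-- A's list equals the closed form
lemma A_eq_target (arr : List Int) (kn : Nat) (hle : kn ≤ arr.length) :
    window_arr2 arr (kn : Int) = some (targetWins arr kn) := by
  unfold window_arr2
  rw [if_neg (by exact_mod_cast Nat.not_lt.mpr hle)]
  rw [PySem.List.slice_to_natCast arr kn, PySem.List.pyRange_one,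
      PySem.List.foldl_append_singleton_eq_map, List.map_map]
  unfold targetWins
  rw [List.singleton_append]
  congr 1
  have hn : ((arr.length : Int) - (kn : Int)).toNat = arr.length - kn := by omega
  rw [hn]
  congr 1
  apply List.map_congr_left
  intro j _
  simp only [Function.comp]
  have h1 : ((kn : Int) + (j : Int) - (kn : Int) + 1) = ((j + 1 : Nat) : Int) := by push_cast; ring
  have h2 : ((kn : Int) + (j : Int) + 1) = ((j + 1 : Nat) : Int) + (kn : Int) := by push_cast; ring
  rw [h1, h2, PySem.List.slice_natCast_add]

-- the windows B's loop emits over l starting from window w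
def emit (w : List Int) : List Int → List (List Int)
  | [] => []
  | x :: l => ((w ++ [x]).drop 1) :: emit ((w ++ [x]).drop 1) l

lemma foldl_step_snd : ∀ (l : List Int) (w : List Int) (out : List (List Int)),
    (l.foldl (fun (st : List Int × List (List Int)) x =>
        ((st.1 ++ [x]).drop 1, st.2 ++ [(st.1 ++ [x]).drop 1])) (w, out)).2
      = out ++ emit w l := by
  intro l
  induction l with
  | nil => intro w out; simp [emit]
  | cons x l ih => intro w out; simp only [List.foldl_cons, emit]; rw [ih]; simp

lemma emit_slide (kn : Nat) : ∀ (l w : List Int), w.length = kn →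
    emit w l = (List.range l.length).map (fun j => ((w ++ l).drop (j + 1)).take kn) := by
  intro l
  induction l with
  | nil => intro w hw; simp [emit]
  | cons x l ih =>
    intro w hw
    have hw2 : ((w ++ [x]).drop 1).length = kn := by simp [hw]
    rw [emit, ih _ hw2, List.length_cons, List.range_succ_eq_map, List.map_cons, List.map_map]
    have hsplit : w ++ x :: l = (w ++ [x]) ++ l := by rw [List.append_assoc]; rfl
    congr 1
    · have hd : (w ++ [x] ++ l).drop (0 + 1) = (w ++ [x]).drop 1 ++ l :=
        List.drop_append_of_le_length (by simp)
      rw [hsplit, hd, ← hw2, List.take_left]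
    · apply List.map_congr_left
      intro j _
      have hd : (w ++ x :: l).drop (j.succ + 1) = ((w ++ [x]).drop 1 ++ l).drop (j + 1) := by
        rw [hsplit, show j.succ + 1 = 1 + (j + 1) by omega, ← List.drop_drop,
            List.drop_append_of_le_length (by simp)]
      simp only [Function.comp]
      rw [hd]

-- B's list equals the closed form
lemma B_eq_target (arr : List Int) (kn : Nat) (hle : kn ≤ arr.length) :
    window_arr2_alt arr (kn : Int) = some (targetWins arr kn) := by
  unfold window_arr2_alt
  rw [if_neg (by exact_mod_cast Nat.not_lt.mpr hle)]
  simp only [PySem.List.slice_to_natCast, PySem.List.slice_from_natCast]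
  rw [foldl_step_snd]
  have htk : (arr.take kn).length = kn := by simp [hle]
  rw [emit_slide kn (arr.drop kn) (arr.take kn) htk, List.take_append_drop]
  unfold targetWins
  congr 2
  simp

-- ===== VERDICT (by name: the statement is the Claim_ definition above) =====
theorem window_arr2_spec : Claim_equal_window_arr2 := by
  unfold Claim_equal_window_arr2
  intro arr k _ hk
  unfold Spec_window_arr2
  unfold Pre_window_arr2 at hk
  obtain ⟨kn, rfl⟩ : ∃ kn : Nat, k = (kn : Int) := ⟨k.toNat, (Int.toNat_of_nonneg hk).symm⟩
  by_cases hle : kn ≤ arr.length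
  · rw [A_eq_target arr kn hle, B_eq_target arr kn hle]
  · have hlt : (arr.length : Int) < (kn : Int) := by exact_mod_cast Nat.lt_of_not_le hle
    unfold window_arr2 window_arr2_alt
    rw [if_pos hlt, if_pos hlt]
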